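-- pv_equiv track=rewrite | github.com/MaksimLazariev/python_learning | Seminar03/Additional tasks/Task 20.py | english_count
-- ===== SOURCE A (Python) =====
-- def english_count(input_text):
--     # Английский словарь
--     eng_alphabet = {1: 'AEIOULNSTR',
--                     2: 'DG',
--                     3: 'BCMP',
--                     4: 'FHVWY',
--                     5: 'K',
--                     8: 'JX',
--                     10: 'QZ'}
--     # считаем сумму очков
--     return sum(
--         [k for i in input_text for k, v in eng_alphabet.items() if i in v])
-- ===== SOURCE B (Python) =====
-- def english_count(input_text):
--     # Английский словарь
--     eng_alphabet = {1: 'AEIOULNSTR',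
--                     2: 'DG',
--                     3: 'BCMP',
--                     4: 'FHVWY',
--                     5: 'K',
--                     8: 'JX',
--                     10: 'QZ'}
--     # invert the groups once into a flat letter->score mapping
--     scores = {c: k for k, v in eng_alphabet.items() for c in v}
--     # count each character once, then take a weighted sum over distinct characters
--     cnt = {}
--     for ch in input_text:
--         cnt[ch] = cnt.get(ch, 0) + 1
--     total = 0
--     for c, n in cnt.items():
--         if c in scores:
--             total += scores[c] * n
--     return total
-- ===== Notes on version B (the rewrite author's own statement) =====
-- stated objective: faster
-- what changed: B inverts the score groups once into a flat letter-to-score mapping and counts characters first, returning a weighted sum over distinct characters instead of rescanning all 7 group strings for every character of the text.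
import Mathlib
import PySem

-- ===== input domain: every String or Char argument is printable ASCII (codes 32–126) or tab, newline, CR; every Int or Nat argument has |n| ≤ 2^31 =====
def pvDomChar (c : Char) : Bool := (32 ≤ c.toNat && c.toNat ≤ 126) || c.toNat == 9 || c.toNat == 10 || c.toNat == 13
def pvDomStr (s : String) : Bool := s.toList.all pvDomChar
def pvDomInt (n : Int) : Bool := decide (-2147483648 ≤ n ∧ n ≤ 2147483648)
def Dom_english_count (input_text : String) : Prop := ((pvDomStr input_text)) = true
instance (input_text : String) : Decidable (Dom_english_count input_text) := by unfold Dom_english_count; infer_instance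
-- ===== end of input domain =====

-- B builds the letter->score table once and counts characters first, replacing A's
-- per-character rescan of the 7 group strings by a weighted sum over distinct characters.


-- ===== PORT A =====
-- eng_alphabet as an association list (dict in insertion order)
def engGroups : List (Int × String) :=
  [(1, "AEIOULNSTR"), (2, "DG"), (3, "BCMP"), (4, "FHVWY"), (5, "K"), (8, "JX"), (10, "QZ")]

-- sum([k for i in input_text for k, v in eng_alphabet.items() if i in v])
-- ('i in v' with i a single character is exactly character membership in v)
def english_count (input_text : String) : Int :=
  (input_text.toList.flatMap (fun i =>
    (engGroups.filter (fun kv => kv.2.toList.contains i)).map (fun kv => kv.1))).sum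

-- ===== PORT B =====
def engGroupsAlt : List (Int × String) :=
  [(1, "AEIOULNSTR"), (2, "DG"), (3, "BCMP"), (4, "FHVWY"), (5, "K"), (8, "JX"), (10, "QZ")]

-- scores = {c: k for k, v in eng_alphabet.items() for c in v}
def engScoresAlt : PySem.Dict Char Int :=
  engGroupsAlt.foldl (fun d kv => kv.2.toList.foldl (fun d c => d.insert c kv.1) d) PySem.Dict.empty

-- cnt = {}; for ch in input_text: cnt[ch] = cnt.get(ch, 0) + 1
-- total = 0; for c, n in cnt.items(): if c in scores: total += scores[c] * n
def english_count_alt (input_text : String) : Int :=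
  let cnt : PySem.Dict Char Int :=
    input_text.toList.foldl (fun d ch => d.insert ch (d.getD ch 0 + 1)) PySem.Dict.empty
  cnt.items.foldl
    (fun total p => if engScoresAlt.contains p.1 then total + engScoresAlt.getD p.1 0 * p.2 else total) 0

-- ===== PRECONDITION & SPEC =====
def Spec_english_count (input_text : String) (out : Int) : Prop := out = english_count_alt input_text
instance (input_text : String) (out : Int) : Decidable (Spec_english_count input_text out) := by unfold Spec_english_count; infer_instance

-- ===== CLAIM (what is proved, stated in full; the proofs are below) =====
def Claim_equal_english_count : Prop := ∀ (input_text : String), Dom_english_count input_text → Spec_english_count input_text (english_count input_text)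

-- ===== LEMMAS AND PROOFS =====

-- A's per-character score (the inner comprehension) as a function of the character.
def pvCharScoreA (c : Char) : Int :=
  ((engGroups.filter (fun kv => kv.2.toList.contains c)).map (fun kv => kv.1)).sum

-- B's per-character score (table lookup, 0 if absent).
def pvCharScoreB (c : Char) : Int :=
  if engScoresAlt.contains c then engScoresAlt.getD c 0 else 0

-- the score table, evaluated once to its literal items list
lemma pv_scores_eq : engScoresAlt = PySem.Dict.mk
    [('A',1),('E',1),('I',1),('O',1),('U',1),('L',1),('N',1),('S',1),('T',1),('R',1),
     ('D',2),('G',2),('B',3),('C',3),('M',3),('P',3),('F',4),('H',4),('V',4),('W',4),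
     ('Y',4),('K',5),('J',8),('X',8),('Q',10),('Z',10)] := by decide

lemma pv_char_score (c : Char) : pvCharScoreA c = pvCharScoreB c := by
  by_cases h : c ∈ ['A','E','I','O','U','L','N','S','T','R','D','G','B','C','M','P','F','H','V','W','Y','K','J','X','Q','Z']
  · fin_cases h <;> decide
  · simp only [List.mem_cons, List.not_mem_nil, or_false, not_or] at h
    obtain ⟨h1,h2,h3,h4,h5,h6,h7,h8,h9,h10,h11,h12,h13,h14,h15,h16,h17,h18,h19,h20,h21,h22,h23,h24,h25,h26⟩ := h
    have e1 : "AEIOULNSTR".toList = ['A','E','I','O','U','L','N','S','T','R'] := by decide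
    have e2 : "DG".toList = ['D','G'] := by decide
    have e3 : "BCMP".toList = ['B','C','M','P'] := by decide
    have e4 : "FHVWY".toList = ['F','H','V','W','Y'] := by decide
    have e5 : "K".toList = ['K'] := by decide
    have e6 : "JX".toList = ['J','X'] := by decide
    have e7 : "QZ".toList = ['Q','Z'] := by decide
    have hA : pvCharScoreA c = 0 := by
      simp only [pvCharScoreA, engGroups]
      simp [e1, e2, e3, e4, e5, e6, e7,
        h1,h2,h3,h4,h5,h6,h7,h8,h9,h10,h11,h12,h13,h14,h15,h16,h17,h18,h19,h20,h21,h22,h23,h24,h25,h26]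
    have hB : engScoresAlt.contains c = false := by
      rw [pv_scores_eq]
      simp [PySem.Dict.contains_mk,
        Ne.symm h1, Ne.symm h2, Ne.symm h3, Ne.symm h4, Ne.symm h5, Ne.symm h6, Ne.symm h7, Ne.symm h8, Ne.symm h9, Ne.symm h10, Ne.symm h11, Ne.symm h12, Ne.symm h13, Ne.symm h14, Ne.symm h15, Ne.symm h16, Ne.symm h17, Ne.symm h18, Ne.symm h19, Ne.symm h20, Ne.symm h21, Ne.symm h22, Ne.symm h23, Ne.symm h24, Ne.symm h25, Ne.symm h26]
    simp [pvCharScoreB, hA, hB]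

-- sum over a nodup list of a function supported at one member
lemma pv_sum_ite_single (s : List Char) (x : Char) (g : Char → Int)
    (hnd : s.Nodup) (hx : x ∈ s) :
    (s.map (fun c => if c = x then g c else 0)).sum = g x := by
  induction s with
  | nil => cases hx
  | cons a s ih =>
    rcases List.mem_cons.mp hx with rfl | hx'
    · have hz : (s.map (fun c => if c = x then g c else 0)).sum = 0 := by
        apply List.sum_eq_zero
        intro y hy
        obtain ⟨c, hc, rfl⟩ := List.mem_map.mp hy
        have : c ≠ x := fun hca => (List.nodup_cons.mp hnd).1 (hca ▸ hc)
        simp [this]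
      rw [List.map_cons, List.sum_cons, hz]
      simp
    · have hne : a ≠ x := fun hax => (List.nodup_cons.mp hnd).1 (hax ▸ hx')
      simp only [List.map_cons, List.sum_cons, if_neg hne]
      rw [ih (List.nodup_cons.mp hnd).2 hx']
      ring

-- weighted sum over a covering nodup list equals the plain sum over the list
lemma pv_sum_eq_weighted (l : List Char) (s : List Char) (f : Char → Int)
    (hnd : s.Nodup) (hsub : ∀ x ∈ l, x ∈ s) :
    (l.map f).sum = (s.map (fun c => f c * (l.count c : Int))).sum := by
  induction l with
  | nil => simp
  | cons x l ih =>
    have hx : x ∈ s := hsub x (List.mem_cons_self ..)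
    have hsub' : ∀ y ∈ l, y ∈ s := fun y hy => hsub y (List.mem_cons_of_mem _ hy)
    have hcount : ∀ c, ((x :: l).count c : Int) = (l.count c : Int) + (if c = x then 1 else 0) := by
      intro c
      rcases eq_or_ne x c with rfl | hne
      · simp
      · simp [hne, Ne.symm hne]
    simp only [List.map_cons, List.sum_cons, ih hsub']
    have : (s.map (fun c => f c * ((x :: l).count c : Int))).sum
        = (s.map (fun c => f c * (l.count c : Int) + (if c = x then f c else 0))).sum := by
      congr 1
      apply List.map_congr_left
      intro c _
      rw [hcount c]
      split_ifs <;> ring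
    rw [this, List.sum_map_add, pv_sum_ite_single s x f hnd hx]
    ring

-- ===== VERDICT (by name: the statement is the Claim_ definition above) =====
theorem english_count_spec : Claim_equal_english_count := by
  intro input_text _
  unfold Spec_english_count english_count english_count_alt
  set l := input_text.toList with hl
  -- B: the counting loop is Counter(l); fold over the mapped items list
  simp only [PySem.Dict.foldl_insert_getD_add_one_eq_counter, PySem.Dict.items_counter,
    List.foldl_map]
  have hstep : (fun (total : Int) (c : Char) =>
      if engScoresAlt.contains c then total + engScoresAlt.getD c 0 * (l.count c : Int) else total)
      = fun total c => total + pvCharScoreB c * (l.count c : Int) := by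
    funext total c
    by_cases h : engScoresAlt.contains c <;> simp [pvCharScoreB, h]
  simp only [hstep]
  rw [PySem.List.foldl_add]
  -- A: flatMap sum = sum of per-character scores
  have hA : (l.flatMap (fun i =>
      (engGroups.filter (fun kv => kv.2.toList.contains i)).map (fun kv => kv.1))).sum
      = (l.map pvCharScoreA).sum := by
    induction l with
    | nil => simp
    | cons a t ih =>
      rw [List.flatMap_cons, List.sum_append, ih, List.map_cons, List.sum_cons]
      rfl
  rw [hA, show pvCharScoreA = pvCharScoreB from funext pv_char_score]
  rw [pv_sum_eq_weighted l (PySem.Set.ofList l) pvCharScoreB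
    (PySem.Set.nodup_ofList l) (fun x hx => (PySem.Set.mem_ofList ..).mpr hx)]
  omega
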